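-- pv_equiv track=rewrite | github.com/AIMLPM/webcrawler | markcrawl/mcp_server.py | _find_snippet
-- ===== SOURCE A (Python) =====
-- def _find_snippet(text: str, query_words: list, context_chars: int = 200) -> str:
--     """Find a text snippet around the first occurrence of any query word."""
--     text_lower = text.lower()
--     best_pos = len(text)
--     for word in query_words:
--         pos = text_lower.find(word)
--         if pos != -1 and pos < best_pos:
--             best_pos = pos
--
--     if best_pos == len(text):
--         return text[:context_chars] + "..." if len(text) > context_chars else text
--
--     start = max(0, best_pos - context_chars // 2)
--     end = min(len(text), best_pos + context_chars // 2)
--     snippet = text[start:end].strip()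
--
--     if start > 0:
--         snippet = "..." + snippet
--     if end < len(text):
--         snippet = snippet + "..."
--
--     return snippet
-- ===== SOURCE B (Python) =====
-- def _find_snippet(text: str, query_words: list, context_chars: int = 200) -> str:
--     """Find a text snippet around the first occurrence of any query word."""
--     text_lower = text.lower()
--     n = len(text)
--     best_pos = next(
--         (i for i in range(n)
--          if any(text_lower.startswith(w, i) for w in query_words)),
--         n,
--     )
--
--     if best_pos == n:
--         return text if n <= context_chars else text[:context_chars] + "..."
--
--     half = context_chars // 2
--     start = max(0, best_pos - half)
--     end = min(n, best_pos + half)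
--     prefix = "..." if start > 0 else ""
--     suffix = "..." if end < n else ""
--     return prefix + text[start:end].strip() + suffix
-- ===== Notes on version B (the rewrite author's own statement) =====
-- stated objective: alternative
-- what changed: A minimises str.find over the query words with an accumulator loop (each find scans the whole text); B instead scans the text once left-to-right and stops at the first index where any query word starts (next() over range(n)), and builds the snippet from prefix/suffix pieces instead of rebinding it.
import Mathlib
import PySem

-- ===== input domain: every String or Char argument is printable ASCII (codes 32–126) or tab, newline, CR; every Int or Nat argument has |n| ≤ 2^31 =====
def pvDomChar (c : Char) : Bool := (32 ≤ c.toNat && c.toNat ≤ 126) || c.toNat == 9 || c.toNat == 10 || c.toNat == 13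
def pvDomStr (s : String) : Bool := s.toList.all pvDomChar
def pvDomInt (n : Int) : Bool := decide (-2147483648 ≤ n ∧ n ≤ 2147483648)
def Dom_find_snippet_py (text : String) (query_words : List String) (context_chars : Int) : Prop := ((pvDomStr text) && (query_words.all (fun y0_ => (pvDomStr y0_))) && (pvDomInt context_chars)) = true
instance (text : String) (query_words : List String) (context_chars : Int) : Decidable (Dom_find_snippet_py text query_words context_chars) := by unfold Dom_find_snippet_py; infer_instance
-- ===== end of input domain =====

-- B replaces A's per-word `str.find` minimisation loop with a single left-to-right scan for the
-- first index where any query word starts (objective: alternative; same cost, different traversal).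

-- ===== PORT A =====
-- Literal transliteration of A (markcrawl/mcp_server.py _find_snippet), on List Char via PySem.
def find_snippet_py (text : String) (query_words : List String) (context_chars : Int) : String :=
  let t := text.toList
  let tl := PySem.Chars.lower t
  let bestPos : Int := query_words.foldl
    (fun best word =>
      let pos := PySem.Chars.find tl word.toList
      if pos ≠ -1 ∧ pos < best then pos else best)
    (t.length : Int)
  if bestPos = (t.length : Int) then
    if (t.length : Int) > context_chars then
      String.ofList (PySem.List.slice t none (some context_chars) ++ "...".toList)
    else text
  else
    let start := max 0 (bestPos - PySem.Int.floordiv context_chars 2)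
    let «end» := min (t.length : Int) (bestPos + PySem.Int.floordiv context_chars 2)
    let snippet := PySem.Chars.strip (PySem.List.slice t (some start) (some «end»))
    let snippet := if start > 0 then "...".toList ++ snippet else snippet
    let snippet := if «end» < (t.length : Int) then snippet ++ "...".toList else snippet
    String.ofList snippet

-- ===== PORT B =====
-- Literal transliteration of Source B: first-index scan with next(), then prefix/suffix build.
-- `text_lower.startswith(w, i)` for 0 ≤ i ≤ len(text) is exactly `startswith` on the i-th suffix.
def find_snippet_py_alt (text : String) (query_words : List String) (context_chars : Int) : String :=
  let t := text.toList
  let tl := PySem.Chars.lower t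
  let n := t.length
  let bestPos : Nat :=
    ((List.range n).find? (fun i =>
        query_words.any (fun w => PySem.Chars.startswith (tl.drop i) w.toList))).getD n
  if bestPos = n then
    if (n : Int) ≤ context_chars then text
    else String.ofList (PySem.List.slice t none (some context_chars) ++ "...".toList)
  else
    let half := PySem.Int.floordiv context_chars 2
    let start := max 0 ((bestPos : Int) - half)
    let «end» := min (n : Int) ((bestPos : Int) + half)
    let pre := if start > 0 then "...".toList else []
    let suf := if «end» < (n : Int) then "...".toList else []
    String.ofList (pre ++ PySem.Chars.strip (PySem.List.slice t (some start) (some «end»)) ++ suf)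

-- ===== PRECONDITION & SPEC =====
def Spec_find_snippet_py (text : String) (query_words : List String) (context_chars : Int) (out : String) : Prop := out = find_snippet_py_alt text query_words context_chars
instance (text : String) (query_words : List String) (context_chars : Int) (out : String) : Decidable (Spec_find_snippet_py text query_words context_chars out) := by unfold Spec_find_snippet_py; infer_instance

-- ===== CLAIM (what is proved, stated in full; the proofs are below) =====
def Claim_equal_find_snippet_py : Prop := ∀ (text : String) (query_words : List String) (context_chars : Int), Dom_find_snippet_py text query_words context_chars → Spec_find_snippet_py text query_words context_chars (find_snippet_py text query_words context_chars)

-- ===== LEMMAS AND PROOFS =====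

-- Abbreviations for the two search loops (proof-side only).
def pvStep (tl : List Char) (best : Int) (w : List Char) : Int :=
  let pos := PySem.Chars.find tl w
  if pos ≠ -1 ∧ pos < best then pos else best

def pvHit (tl : List Char) (ws : List (List Char)) (i : Nat) : Bool :=
  ws.any (fun w => PySem.Chars.startswith (tl.drop i) w)

-- find's specification at start 0
theorem pv_find_spec (tl w : List Char) (h : PySem.Chars.find tl w ≠ -1) :
    0 ≤ PySem.Chars.find tl w ∧ w <+: tl.drop (PySem.Chars.find tl w).toNat ∧
      ∀ i : Nat, i < (PySem.Chars.find tl w).toNat → ¬ w <+: tl.drop i := by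
  have := PySem.Chars.findFrom_natCast_spec tl w 0 (Nat.zero_le _)
  rw [Nat.cast_zero, PySem.Chars.findFrom_zero] at this
  obtain ⟨h0, h1, h2⟩ := this h
  exact ⟨h0, h1, fun i hi => h2 i (Nat.zero_le _) hi⟩

theorem pv_find_ne_of_prefix (tl w : List Char) (i : Nat) (hp : w <+: tl.drop i) :
    PySem.Chars.find tl w ≠ -1 := by
  rw [Ne, PySem.Chars.find_eq_neg_one_iff, not_not]
  exact hp.isInfix.trans (List.drop_suffix i tl).isInfix

theorem pv_find_le_idx (tl w : List Char) (i : Nat) (hp : w <+: tl.drop i) :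
    (PySem.Chars.find tl w).toNat ≤ i := by
  have h := pv_find_ne_of_prefix tl w i hp
  obtain ⟨_, _, h2⟩ := pv_find_spec tl w h
  by_contra hlt
  exact h2 i (by omega) hp

-- Properties of A's fold
theorem pv_foldA_le (tl : List Char) (ws : List (List Char)) (a : Int) :
    ws.foldl (pvStep tl) a ≤ a := by
  induction ws generalizing a with
  | nil => simp
  | cons w ws ih =>
    refine le_trans (ih _) ?_
    simp only [pvStep]
    split_ifs with h
    · exact le_of_lt h.2
    · exact le_rfl

theorem pv_foldA_shape (tl : List Char) (ws : List (List Char)) (a : Int) :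
    ws.foldl (pvStep tl) a = a ∨
      ∃ w ∈ ws, PySem.Chars.find tl w = ws.foldl (pvStep tl) a ∧ PySem.Chars.find tl w ≠ -1 := by
  induction ws generalizing a with
  | nil => simp
  | cons w ws ih =>
    simp only [List.foldl_cons]
    rcases ih (pvStep tl a w) with h | ⟨w', hw', hfind, hne⟩
    · rw [h]
      simp only [pvStep]
      split_ifs with hc
      · exact Or.inr ⟨w, by simp, rfl, hc.1⟩
      · exact Or.inl rfl
    · exact Or.inr ⟨w', List.mem_cons_of_mem _ hw', hfind, hne⟩

theorem pv_foldA_min (tl : List Char) (ws : List (List Char)) (a : Int) :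
    ∀ w ∈ ws, PySem.Chars.find tl w ≠ -1 → ws.foldl (pvStep tl) a ≤ PySem.Chars.find tl w := by
  induction ws generalizing a with
  | nil => simp
  | cons w ws ih =>
    intro w' hw' hne
    rcases List.mem_cons.mp hw' with rfl | hmem
    · refine le_trans (pv_foldA_le tl ws _) ?_
      simp only [pvStep]
      split_ifs with hc
      · exact le_rfl
      · exact le_of_not_gt (fun hlt => hc ⟨hne, hlt⟩)
    · exact ih _ w' hmem hne

-- Properties of B's scan
theorem pv_scan_le (tl : List Char) (ws : List (List Char)) :
    ((List.range tl.length).find? (pvHit tl ws)).getD tl.length ≤ tl.length := by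
  cases h : (List.range tl.length).find? (pvHit tl ws) with
  | none => simp
  | some i =>
    have := List.mem_of_find?_eq_some h
    simp only [List.mem_range] at this
    simp [Option.getD, le_of_lt this]

theorem pv_scan_hit (tl : List Char) (ws : List (List Char))
    (h : ((List.range tl.length).find? (pvHit tl ws)).getD tl.length < tl.length) :
    pvHit tl ws (((List.range tl.length).find? (pvHit tl ws)).getD tl.length) = true := by
  cases hf : (List.range tl.length).find? (pvHit tl ws) with
  | none => rw [hf] at h; simp at h
  | some i => simpa using List.find?_some hf

theorem pv_scan_min (tl : List Char) (ws : List (List Char)) (i : Nat)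
    (h : i < ((List.range tl.length).find? (pvHit tl ws)).getD tl.length) :
    pvHit tl ws i = false := by
  cases hf : (List.range tl.length).find? (pvHit tl ws) with
  | none =>
    rw [hf] at h
    have := List.find?_eq_none.mp hf i (List.mem_range.mpr (by simpa using h))
    simpa using this
  | some j =>
    rw [hf] at h
    simp only [Option.getD] at h
    obtain ⟨hpj, as, bs, heq, hall⟩ := List.find?_eq_some_iff_append.mp hf
    have hjlt : j < tl.length := by
      have := List.mem_of_find?_eq_some hf; simpa using this
    have hlens : tl.length = as.length + bs.length + 1 := by
      have h5 := congrArg List.length heq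
      rw [List.length_range, List.length_append, List.length_cons] at h5
      omega
    have h3 : (List.range tl.length)[as.length]'(by rw [List.length_range]; omega) = j := by
      simp only [heq]
      rw [List.getElem_append_right (Nat.le_refl _)]
      simp
    have hlen : as.length = j := by
      rw [List.getElem_range] at h3
      exact h3
    have has : as = List.range j := by
      have h4 := congrArg (List.take as.length) heq
      rw [List.take_left] at h4
      rw [← h4, List.take_range]
      congr 1
      omega
    have hi_mem : i ∈ as := by
      rw [has, List.mem_range]
      exact h
    have := hall i hi_mem
    simpa using this

-- Uniqueness: a value with the "first index where P holds, else n" properties is unique.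
theorem pv_unique (n : Nat) (P : Nat → Bool) (r : Int) (s : Nat)
    (hr0 : 0 ≤ r) (hrle : r ≤ (n : Int)) (hsle : s ≤ n)
    (hrhit : r < (n : Int) → P r.toNat = true)
    (hrmin : ∀ i : Nat, (i : Int) < r → P i = false)
    (hshit : s < n → P s = true)
    (hsmin : ∀ i : Nat, i < s → P i = false) : r = (s : Int) := by
  rcases lt_trichotomy r ((s : Nat) : Int) with h | h | h
  · exfalso
    have hrn : r < (n : Int) := by omega
    have h1 := hrhit hrn
    have h2 := hsmin r.toNat (by omega)
    rw [h2] at h1; exact Bool.false_ne_true h1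
  · exact h
  · exfalso
    have hsn : s < n := by omega
    have h1 := hshit hsn
    have h2 := hrmin s (by omega)
    rw [h2] at h1; exact Bool.false_ne_true h1

-- The two searches agree.
theorem pv_best_eq (tl : List Char) (ws : List (List Char)) :
    ws.foldl (pvStep tl) (tl.length : Int)
      = ((((List.range tl.length).find? (pvHit tl ws)).getD tl.length : Nat) : Int) := by
  apply pv_unique tl.length (pvHit tl ws)
  · rcases pv_foldA_shape tl ws (tl.length : Int) with h | ⟨w, _, hfind, hne⟩
    · rw [h]; exact Int.natCast_nonneg _
    · rw [← hfind]; exact (pv_find_spec tl w hne).1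
  · exact pv_foldA_le tl ws _
  · exact pv_scan_le tl ws
  · intro hlt
    rcases pv_foldA_shape tl ws (tl.length : Int) with h | ⟨w, hw, hfind, hne⟩
    · rw [h] at hlt; omega
    · obtain ⟨_, hpre, _⟩ := pv_find_spec tl w hne
      rw [hfind] at hpre
      simp only [pvHit, List.any_eq_true]
      exact ⟨w, hw, (PySem.Chars.startswith_iff _ _).mpr hpre⟩
  · intro i hi
    by_contra hh
    rw [Bool.not_eq_false] at hh
    simp only [pvHit, List.any_eq_true] at hh
    obtain ⟨w, hw, hsw⟩ := hh
    have hp := (PySem.Chars.startswith_iff _ _).mp hsw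
    have hne := pv_find_ne_of_prefix tl w i hp
    have h1 := pv_foldA_min tl ws (tl.length : Int) w hw hne
    have h2 := pv_find_le_idx tl w i hp
    have h3 := (pv_find_spec tl w hne).1
    omega
  · exact pv_scan_hit tl ws
  · intro i hi
    exact pv_scan_min tl ws i hi

-- ===== VERDICT (by name: the statement is the Claim_ definition above) =====
theorem find_snippet_py_spec : Claim_equal_find_snippet_py := by
  intro text query_words context_chars _
  unfold Spec_find_snippet_py find_snippet_py find_snippet_py_alt
  simp only
  -- the two search loops compute the same position
  have hpred : pvHit (PySem.Chars.lower text.toList) (query_words.map String.toList)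
      = fun i => query_words.any
          (fun w => PySem.Chars.startswith ((PySem.Chars.lower text.toList).drop i) w.toList) := by
    funext i
    simp only [pvHit]
    rw [List.any_map]
    rfl
  have hbest := pv_best_eq (PySem.Chars.lower text.toList) (query_words.map String.toList)
  rw [List.foldl_map, hpred] at hbest
  have hlen : (PySem.Chars.lower text.toList).length = text.toList.length := by
    simp [PySem.Chars.lower]
  rw [hlen] at hbest
  rw [show (fun best (word : String) =>
        let pos := PySem.Chars.find (PySem.Chars.lower text.toList) word.toList;
        if pos ≠ -1 ∧ pos < best then pos else best)
      = fun best (word : String) => pvStep (PySem.Chars.lower text.toList) best word.toList from rfl]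
  rw [hbest]
  set s := ((List.range text.toList.length).find?
      (fun i => query_words.any
        (fun w => PySem.Chars.startswith ((PySem.Chars.lower text.toList).drop i) w.toList))).getD
      text.toList.length with hs
  by_cases hmatch : s = text.toList.length
  · rw [hmatch]
    rw [if_pos rfl, if_pos rfl]
    split_ifs with h1 h2 <;> first | rfl | omega
  · have hne : ((s : Nat) : Int) ≠ (text.toList.length : Int) := by
      exact_mod_cast hmatch
    rw [if_neg hne, if_neg hmatch]
    split_ifs with h1 h2 <;> simp
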